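-- pv_equiv track=rewrite | github.com/seony1ll98/algorithm-study | seonil/SWEA/PYTHON/swea14510.py | solve
-- ===== SOURCE A (Python) =====
-- def solve(N, trees):
--     max_h = max(trees)  # 가장 큰 나무의 키
--     diffs = [max_h - h for h in trees]  # 각 나무별로 얼마나 더 자라야 하는지
--     total = sum(diffs)  # 모든 나무의 필요 성장량 총합
--
--     # 모든 나무의 필요 성장량이 0이 되면 전부 다 자란 것이므로 종료.
--     if total == 0:
--         return 0
--
--     """
--     <핵심 아이디어>
--     각 나무의 필요 성장량 d를 (+1을 a번) + (+2를 b번)으로 쪼갬.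
--     #   → a + 2b = d
--     # 짝수 날(+2)을 최대한 많이 쓰면 전체 날짜가 줄어듦.
--     """
--     sum_half = sum(d // 2 for d in diffs) # 최대 짝수날 사용량
--     sum_odd_remain = sum(d % 2 for d in diffs) # 최대 짝수날 사용 이후 남은 홀수 개수
--
--     def feasible(D):
--         """
--         D일 안에 나무들이 조건을 만족할 수 있는지 판정하는 함수
--         """
--         odd_days = (D + 1) // 2 # D일 중 홀수 번째 날의 개수
--         even_days = D // 2      # D일 중 짝수 번째 날의 개수
--
--         # 짝수 날을 얼마나 쓸 수 있는지 결정하기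
--
--         # 짝수 날이 충분히 많아서 원하는 만큼 +2를 쓸 수 있으면
--         if even_days >= sum_half:
--             req_odd_days = sum_odd_remain      # 각 나무에서 최소로 필요한 +1 만 쓰면 OK
--
--         # 만약 짝수 날이 부족해서 +2를 even_days 밖에 못쓰면 나머지는 전부 +1로 메워야됨
--         else:
--             req_odd_days = total - 2 * even_days
--
--         # 써야 할 +1의 개수가 홀수 날 개수 이하이고, 실제로 물 주는 날의 총합이 D 이하이면 가능
--         return req_odd_days <= odd_days and req_odd_days + min(sum_half, even_days) <= D
--
--     """
--     이분탐색으로 최소 D 찾기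
--     """
--     lo, hi = 1, 2 * total + 5   # 넉넉하게 최악의 경우 2*total에 마진 +5까지 상한으로 잡았음
--     while lo < hi:
--         # 중간값을 시도
--         mid = (lo + hi) // 2
--         if feasible(mid):
--             hi = mid        # mid일에 가능하면 범위를 왼쪽으로
--         else:
--             lo = mid + 1    # mid일에 불가능하면 범위를 오른쪽으로
--
--     return lo   # 루프 종료 시 lo == hi == 가능한 최소
-- ===== SOURCE B (Python) =====
-- def solve(N, trees):
--     max_h = max(trees)
--     total = sum(max_h - h for h in trees)
--     if total == 0:
--         return 0
--     so = sum((max_h - h) % 2 for h in trees)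
--     return max((2 * total + 2) // 3, 2 * so - 1)
-- ===== Notes on version B (the rewrite author's own statement) =====
-- stated objective: simpler
-- what changed: Replaced the binary search with its feasibility predicate by a direct closed-form answer max(ceil(2*total/3), 2*So-1), since feasibility is exactly two monotone lower bounds on D.
-- outside the precondition, e.g. on solve(0, []): A raises ValueError, B raises ValueError
import Mathlib
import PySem

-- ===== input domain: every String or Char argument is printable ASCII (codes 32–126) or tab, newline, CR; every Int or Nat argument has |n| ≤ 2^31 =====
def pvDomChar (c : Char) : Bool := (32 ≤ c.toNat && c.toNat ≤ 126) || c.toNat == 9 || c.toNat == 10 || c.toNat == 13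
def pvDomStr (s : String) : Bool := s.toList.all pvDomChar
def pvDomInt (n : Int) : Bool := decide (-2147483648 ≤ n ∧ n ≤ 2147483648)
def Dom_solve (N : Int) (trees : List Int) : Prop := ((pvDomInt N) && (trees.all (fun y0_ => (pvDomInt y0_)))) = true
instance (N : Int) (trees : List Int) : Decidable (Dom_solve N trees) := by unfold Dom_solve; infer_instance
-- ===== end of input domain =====

-- B replaces A's binary search over the feasibility predicate by a direct closed-form answer.

-- ===== PORT A =====
-- feasible(D) from A, with the outer-scope values total / sum_half / sum_odd_remain as parameters
def feasibleA (total sumHalf sumOdd D : Int) : Bool :=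
  let oddDays := PySem.Int.floordiv (D + 1) 2
  let evenDays := PySem.Int.floordiv D 2
  let reqOdd := if sumHalf ≤ evenDays then sumOdd else total - 2 * evenDays
  decide (reqOdd ≤ oddDays) && decide (reqOdd + min sumHalf evenDays ≤ D)

-- the 'while lo < hi' binary-search loop of A
def bsearchA (total sumHalf sumOdd lo hi : Int) : Int :=
  if h : lo < hi then
    let mid := PySem.Int.floordiv (lo + hi) 2
    if feasibleA total sumHalf sumOdd mid then
      bsearchA total sumHalf sumOdd lo mid
    else
      bsearchA total sumHalf sumOdd (mid + 1) hi
  else lo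
termination_by (hi - lo).toNat
decreasing_by
  · have := PySem.Int.floordiv_eq_ediv_of_pos (a := lo + hi) (b := 2) (by norm_num)
    simp only [this]; omega
  · have := PySem.Int.floordiv_eq_ediv_of_pos (a := lo + hi) (b := 2) (by norm_num)
    simp only [this]; omega

-- Python's max(trees) raises on []; that case is outside Pre_solve (we return 0 there)
def solve (N : Int) (trees : List Int) : Int :=
  match PySem.List.max? trees (fun x => x) with
  | none => 0
  | some maxH =>
    let diffs := trees.map (fun h => maxH - h)
    let total := diffs.sum
    if total = 0 then 0
    else
      let sumHalf := (diffs.map (fun d => PySem.Int.floordiv d 2)).sum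
      let sumOdd := (diffs.map (fun d => PySem.Int.mod d 2)).sum
      bsearchA total sumHalf sumOdd 1 (2 * total + 5)

-- ===== PORT B =====
def solve_alt (N : Int) (trees : List Int) : Int :=
  match PySem.List.max? trees (fun x => x) with
  | none => 0
  | some maxH =>
    let total := (trees.map (fun h => maxH - h)).sum
    if total = 0 then 0
    else
      let so := (trees.map (fun h => PySem.Int.mod (maxH - h) 2)).sum
      max (PySem.Int.floordiv (2 * total + 2) 3) (2 * so - 1)

-- ===== PRECONDITION & SPEC =====
-- Pre_ excludes only the empty list, on which Python's max([]) raises ValueError (in both A and B)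
def Pre_solve (N : Int) (trees : List Int) : Prop := trees ≠ []
instance (N : Int) (trees : List Int) : Decidable (Pre_solve N trees) := by unfold Pre_solve; infer_instance
def pvWitness_solve : Int × List Int := (3, [1, 2, 3])

def Spec_solve (N : Int) (trees : List Int) (out : Int) : Prop := out = solve_alt N trees
instance (N : Int) (trees : List Int) (out : Int) : Decidable (Spec_solve N trees out) := by unfold Spec_solve; infer_instance

-- ===== CLAIM (what is proved, stated in full; the proofs are below) =====
def Claim_equal_solve : Prop := ∀ (N : Int) (trees : List Int), Dom_solve N trees → Pre_solve N trees → Spec_solve N trees (solve N trees)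

-- ===== LEMMAS AND PROOFS =====

-- sum of a list of ints decomposes through floor-division and mod by 2
lemma sum_decomp (l : List Int) :
    l.sum = 2 * (l.map (fun d => PySem.Int.floordiv d 2)).sum + (l.map (fun d => PySem.Int.mod d 2)).sum := by
  induction l with
  | nil => simp
  | cons d t ih =>
    have h1 := PySem.Int.floordiv_eq_ediv_of_pos (a := d) (b := 2) (by norm_num)
    have h2 := PySem.Int.mod_eq_emod_of_pos (a := d) (b := 2) (by norm_num)
    simp only [List.map_cons, List.sum_cons, h1, h2, ih]
    omega

lemma sum_mod2_nonneg (l : List Int) : 0 ≤ (l.map (fun d => PySem.Int.mod d 2)).sum := by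
  induction l with
  | nil => simp
  | cons d t ih =>
    have h2 := PySem.Int.mod_eq_emod_of_pos (a := d) (b := 2) (by norm_num)
    simp only [List.map_cons, List.sum_cons, h2]
    omega

lemma sum_half_nonneg (l : List Int) (h : ∀ d ∈ l, 0 ≤ d) :
    0 ≤ (l.map (fun d => PySem.Int.floordiv d 2)).sum := by
  induction l with
  | nil => simp
  | cons d t ih =>
    have h1 := PySem.Int.floordiv_eq_ediv_of_pos (a := d) (b := 2) (by norm_num)
    have hd : 0 ≤ d := h d (by simp)
    have ht := ih (fun x hx => h x (by simp [hx]))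
    simp only [List.map_cons, List.sum_cons, h1]
    omega

-- feasibility is exactly the closed-form lower bound
lemma feasible_iff (T H S D : Int) (hT : T = 2 * H + S) (hH : 0 ≤ H) (hS : 0 ≤ S) (hpos : 0 < T) :
    feasibleA T H S D = true ↔ max (PySem.Int.floordiv (2 * T + 2) 3) (2 * S - 1) ≤ D := by
  have e1 := PySem.Int.floordiv_eq_ediv_of_pos (a := D + 1) (b := 2) (by norm_num)
  have e2 := PySem.Int.floordiv_eq_ediv_of_pos (a := D) (b := 2) (by norm_num)
  have e3 := PySem.Int.floordiv_eq_ediv_of_pos (a := 2 * T + 2) (b := 3) (by norm_num)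
  simp only [feasibleA, e1, e2, e3, Bool.and_eq_true, decide_eq_true_eq, max_le_iff]
  split_ifs with hc <;> omega

-- the binary search converges to F when feasibility is 'F ≤ D'
lemma bsearch_eq (T H S F : Int) (hiff : ∀ D, feasibleA T H S D = true ↔ F ≤ D) :
    ∀ (n : ℕ) (lo hi : Int), (hi - lo).toNat = n → lo ≤ F → F ≤ hi → bsearchA T H S lo hi = F := by
  intro n
  induction n using Nat.strong_induction_on with
  | _ n ih =>
    intro lo hi hn hlo hhi
    rw [bsearchA]
    split_ifs with hlt
    · have hm := PySem.Int.floordiv_eq_ediv_of_pos (a := lo + hi) (b := 2) (by norm_num)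
      have hb : lo ≤ PySem.Int.floordiv (lo + hi) 2 ∧ PySem.Int.floordiv (lo + hi) 2 < hi := by
        rw [hm]; omega
      by_cases hf : feasibleA T H S (PySem.Int.floordiv (lo + hi) 2) = true
      · have hF : F ≤ PySem.Int.floordiv (lo + hi) 2 := (hiff _).1 hf
        simp only [hf, if_true]
        exact ih (PySem.Int.floordiv (lo + hi) 2 - lo).toNat (by omega) lo _ rfl hlo hF
      · have hF : PySem.Int.floordiv (lo + hi) 2 + 1 ≤ F := by
          have := (hiff (PySem.Int.floordiv (lo + hi) 2)).2
          by_contra h'; exact hf (this (by omega))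
        simp only [hf]
        exact ih (hi - (PySem.Int.floordiv (lo + hi) 2 + 1)).toNat (by omega) _ hi rfl hF hhi
    · omega

-- ===== VERDICT (by name: the statement is the Claim_ definition above) =====
theorem solve_spec : Claim_equal_solve := by
  intro N trees _ hpre
  unfold Spec_solve solve solve_alt
  cases hmx : PySem.List.max? trees (fun x => x) with
  | none => rfl
  | some maxH =>
    simp only []
    have hle : ∀ h ∈ trees, h ≤ maxH := fun h hh => PySem.List.max?_isMax hmx h hh
    set diffs := trees.map (fun h => maxH - h) with hd
    have hdn : ∀ d ∈ diffs, 0 ≤ d := by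
      intro d hdm
      rcases List.mem_map.1 hdm with ⟨h, hh, rfl⟩
      have := hle h hh; omega
    set T := diffs.sum with hT
    by_cases h0 : T = 0
    · simp [h0]
    · simp only [h0, if_false]
      set H := (diffs.map (fun d => PySem.Int.floordiv d 2)).sum with hHdef
      set S := (diffs.map (fun d => PySem.Int.mod d 2)).sum with hSdef
      have hso : (trees.map (fun h => PySem.Int.mod (maxH - h) 2)).sum = S := by
        rw [hSdef, hd, List.map_map]; rfl
      have hdec : T = 2 * H + S := sum_decomp diffs
      have hHn : 0 ≤ H := sum_half_nonneg diffs hdn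
      have hSn : 0 ≤ S := sum_mod2_nonneg diffs
      have hpos : 0 < T := by omega
      set F := max (PySem.Int.floordiv (2 * T + 2) 3) (2 * S - 1) with hF
      have hiff := fun D => feasible_iff T H S D hdec hHn hSn hpos
      have e3 := PySem.Int.floordiv_eq_ediv_of_pos (a := 2 * T + 2) (b := 3) (by norm_num)
      have h1F : 1 ≤ F := by rw [hF, e3]; omega
      have hFhi : F ≤ 2 * T + 5 := by rw [hF, e3]; omega
      rw [bsearch_eq T H S F hiff (2 * T + 5 - 1).toNat 1 (2 * T + 5) (by omega) h1F hFhi, hso]
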